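-- pv_equiv track=rewrite | github.com/piotrhelm/NESTFUL | data_v2/executable_functions/py_code_file_3685.py | format_and_remove_special_characters
-- ===== SOURCE A (Python) =====
-- def format_and_remove_special_characters(text: str) -> str:
--
--     """Formats and removes special characters from a given string.
--
--
--
--     Args:
--
--         text: The input string.
--
--
--
--     Returns:
--
--         The formatted string with special characters removed.
--
--     """
--
--     special_characters = set('!@#$%^&*()-_=+{}[]\|;:"\',<>/?.~`')
--
--
--
--     formatted_text = []
--
--     for i, character in enumerate(text):
--
--         if character not in special_characters and character.isalnum():
--
--             formatted_text.append(character)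
--
--         elif character in special_characters:
--
--             if i == 0 or i == len(text) - 1:
--
--                 continue
--
--             else:
--
--                 formatted_text.append('_')
--
--
--
--     return ''.join(formatted_text)
-- ===== SOURCE B (Python) =====
-- def format_and_remove_special_characters(text: str) -> str:
--     specials = '!@#$%^&*()-_=+{}[]\\|;:"\',<>/?.~`'
--     # mark every special char with a sentinel, split into the runs between specials,
--     # clean each run down to its alphanumerics, and join the runs with '_'
--     marked = text.translate({ord(c): '\x00' for c in specials})
--     pieces = marked.split('\x00')
--     out = '_'.join(''.join(filter(str.isalnum, p)) for p in pieces)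
--     # a special char at either end produced a boundary '_' that A's edge rule omits
--     if text and text[0] in specials:
--         out = out[1:]
--     if text and text[-1] in specials:
--         out = out[:-1]
--     return out
-- ===== Notes on version B (the rewrite author's own statement) =====
-- stated objective: alternative
-- what changed: Instead of A's indexed character loop with positional i==0/i==len-1 tests, B marks every special char with a sentinel via str.translate, splits the string into the runs between specials, reduces each run to its alphanumerics, joins the runs with an underscore, and finally trims the boundary underscore when the string starts/ends with a special char.
import Mathlib
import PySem

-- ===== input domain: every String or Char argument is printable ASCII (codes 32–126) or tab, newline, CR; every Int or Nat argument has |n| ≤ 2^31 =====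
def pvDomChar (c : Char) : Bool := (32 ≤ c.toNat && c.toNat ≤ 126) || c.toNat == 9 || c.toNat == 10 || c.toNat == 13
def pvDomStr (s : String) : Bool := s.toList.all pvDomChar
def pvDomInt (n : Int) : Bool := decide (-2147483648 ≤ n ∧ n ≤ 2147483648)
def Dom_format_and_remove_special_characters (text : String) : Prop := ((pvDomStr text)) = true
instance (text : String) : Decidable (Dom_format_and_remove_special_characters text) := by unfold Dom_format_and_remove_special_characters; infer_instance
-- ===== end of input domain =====

-- B replaces A's indexed loop (with positional edge tests) by a split/join pipeline: specials become
-- piece separators, each piece is reduced to its alphanumerics, pieces are joined with '_', and a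
-- boundary '_' is trimmed when the text starts/ends with a special char (objective: alternative).

-- ===== PORT A =====
-- the literal set('!@#$%^&*()-_=+{}[]\|;:"\',<>/?.~`'), shared by both Pythons
def pvSpecial : PySem.Set Char := PySem.Set.ofList "!@#$%^&*()-_=+{}[]\\|;:\"',<>/?.~`".toList

def format_and_remove_special_characters (text : String) : String :=
  let n : Int := PySem.Str.len text
  let formatted : List Char :=
    (PySem.List.enumerate text.toList 0).foldl (fun acc ic =>
      if !(PySem.Set.contains pvSpecial ic.2) && PySem.Chars.isalnum ic.2 then
        acc ++ [ic.2]
      else if PySem.Set.contains pvSpecial ic.2 then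
        if ic.1 = 0 ∨ ic.1 = n - 1 then acc else acc ++ ['_']
      else acc) []
  String.ofList formatted

-- ===== PORT B =====
-- helpers mirroring Source B's library calls: translate-to-sentinel, str.split('\x00'),
-- filter(str.isalnum, ·), and '_'.join(·)
def pvMark (c : Char) : Char := if PySem.Set.contains pvSpecial c then '\x00' else c

def pvSplit : List Char → List (List Char)
  | [] => [[]]
  | c :: t =>
    if c = '\x00' then [] :: pvSplit t
    else
      match pvSplit t with
      | [] => [[c]]
      | p :: ps => (c :: p) :: ps

def pvClean (p : List Char) : List Char := p.filter (fun c => PySem.Chars.isalnum c)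

def pvJoin : List (List Char) → List Char
  | [] => []
  | [p] => p
  | p :: q :: ps => p ++ '_' :: pvJoin (q :: ps)

def format_and_remove_special_characters_alt (text : String) : String :=
  let cs := text.toList
  let marked := cs.map pvMark
  let pieces := pvSplit marked
  let out := pvJoin (pieces.map pvClean)
  let out1 :=
    match cs.head? with
    | some c => if PySem.Set.contains pvSpecial c then out.drop 1 else out
    | none => out
  let out2 :=
    match cs.getLast? with
    | some c => if PySem.Set.contains pvSpecial c then out1.dropLast else out1
    | none => out1
  String.ofList out2

-- ===== PRECONDITION & SPEC =====
def Spec_format_and_remove_special_characters (text : String) (out : String) : Prop := out = format_and_remove_special_characters_alt text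
instance (text : String) (out : String) : Decidable (Spec_format_and_remove_special_characters text out) := by unfold Spec_format_and_remove_special_characters; infer_instance

-- ===== CLAIM (what is proved, stated in full; the proofs are below) =====
def Claim_equal_format_and_remove_special_characters : Prop := ∀ (text : String), Dom_format_and_remove_special_characters text → Spec_format_and_remove_special_characters text (format_and_remove_special_characters text)

-- ===== LEMMAS AND PROOFS =====

-- A's loop body, named so lemmas can speak about it (definitionally equal to the lambda in the port)
def pvStepA (n : Int) (acc : List Char) (ic : Int × Char) : List Char :=
  if !(PySem.Set.contains pvSpecial ic.2) && PySem.Chars.isalnum ic.2 then acc ++ [ic.2]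
  else if PySem.Set.contains pvSpecial ic.2 then
    if ic.1 = 0 ∨ ic.1 = n - 1 then acc else acc ++ ['_']
  else acc

-- contribution of an interior character / of an edge character
def pvGInt (c : Char) : List Char :=
  if PySem.Set.contains pvSpecial c then ['_']
  else if PySem.Chars.isalnum c then [c] else []

def pvGEdge (c : Char) : List Char :=
  if PySem.Set.contains pvSpecial c then []
  else if PySem.Chars.isalnum c then [c] else []

-- B's two trimming steps, as a function of the char list and the untrimmed body
def pvTrim (cs body : List Char) : List Char :=
  let body1 :=
    match cs.head? with
    | some c => if PySem.Set.contains pvSpecial c then body.drop 1 else body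
    | none => body
  match cs.getLast? with
  | some c => if PySem.Set.contains pvSpecial c then body1.dropLast else body1
  | none => body1

lemma pvSplit_ne_nil (l : List Char) : pvSplit l ≠ [] := by
  cases l with
  | nil => simp [pvSplit]
  | cons c t =>
    unfold pvSplit
    split_ifs
    · simp
    · cases h : pvSplit t <;> simp

lemma pvJoin_cons_append (a x : List Char) (ps : List (List Char)) :
    pvJoin ((a ++ x) :: ps) = a ++ pvJoin (x :: ps) := by
  cases ps <;> simp [pvJoin]

-- the untrimmed split/join body equals the per-character interior contribution
lemma pvBody_eq (cs : List Char) (h : '\x00' ∉ cs) :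
    pvJoin ((pvSplit (cs.map pvMark)).map pvClean) = cs.flatMap pvGInt := by
  induction cs with
  | nil => rfl
  | cons c t ih =>
    have hc : c ≠ '\x00' := fun hc => h (hc ▸ List.mem_cons_self)
    have ht : '\x00' ∉ t := fun hm => h (List.mem_cons_of_mem _ hm)
    by_cases hS : c ∈ pvSpecial
    · -- c special: pvMark c = NUL, split puts an empty piece in front
      have : (c :: t).map pvMark = '\x00' :: t.map pvMark := by simp [pvMark, hS]
      rw [this]
      have hne := pvSplit_ne_nil (t.map pvMark)
      obtain ⟨p, ps, hps⟩ := List.exists_cons_of_ne_nil hne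
      rw [show pvSplit ('\x00' :: t.map pvMark) = [] :: pvSplit (t.map pvMark) by
        simp [pvSplit]]
      have ih' := ih ht
      rw [hps] at ih' ⊢
      simp only [List.map_cons] at ih' ⊢
      rw [show pvClean [] = [] from rfl, show ([] : List Char) :: pvClean p :: ps.map pvClean
            = (([] : List Char) ++ ([] : List Char)) :: pvClean p :: ps.map pvClean by simp]
      rw [pvJoin_cons_append]
      simp only [List.nil_append]
      rw [show pvJoin (([] : List Char) :: pvClean p :: ps.map pvClean)
            = '_' :: pvJoin (pvClean p :: ps.map pvClean) by simp [pvJoin]]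
      rw [ih']
      simp [pvGInt, hS]
    · -- c not special: pvMark c = c ≠ NUL, c is prepended to the first piece
      have hm : (c :: t).map pvMark = c :: t.map pvMark := by simp [pvMark, hS]
      rw [hm]
      have hne := pvSplit_ne_nil (t.map pvMark)
      obtain ⟨p, ps, hps⟩ := List.exists_cons_of_ne_nil hne
      rw [show pvSplit (c :: t.map pvMark) = (c :: p) :: ps by
        unfold pvSplit; rw [if_neg hc, hps]]
      have ih' := ih ht
      rw [hps] at ih'
      simp only [List.map_cons] at ih' ⊢
      have hclean : pvClean (c :: p)
          = (if PySem.Chars.isalnum c then [c] else []) ++ pvClean p := by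
        by_cases hA : PySem.Chars.isalnum c = true <;> simp [pvClean, hA]
      rw [hclean, pvJoin_cons_append, ih']
      by_cases hA : PySem.Chars.isalnum c = true <;> simp [pvGInt, hS, hA]

lemma pvStep_first (n : Int) (acc : List Char) (c : Char) :
    pvStepA n acc (0, c) = acc ++ pvGEdge c := by
  by_cases hS : c ∈ pvSpecial <;>
    by_cases hA : PySem.Chars.isalnum c = true <;>
    simp [pvStepA, pvGEdge, hS, hA]

lemma pvStep_last (n : Int) (acc : List Char) (c : Char) :
    pvStepA n acc (n - 1, c) = acc ++ pvGEdge c := by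
  by_cases hS : c ∈ pvSpecial <;>
    by_cases hA : PySem.Chars.isalnum c = true <;>
    simp [pvStepA, pvGEdge, hS, hA]

lemma pvStep_mid (n : Int) (acc : List Char) (i : Int) (c : Char)
    (h0 : i ≠ 0) (h1 : i ≠ n - 1) :
    pvStepA n acc (i, c) = acc ++ pvGInt c := by
  by_cases hS : c ∈ pvSpecial <;>
    by_cases hA : PySem.Chars.isalnum c = true <;>
    simp [pvStepA, pvGInt, hS, hA, h0, h1]

lemma pvFoldl_mid (n : Int) (mid : List Char) :
    ∀ (s : Int) (acc : List Char),
      (∀ k : Nat, k < mid.length → (s + k ≠ 0 ∧ s + k ≠ n - 1)) →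
      (PySem.List.enumerate mid s).foldl (pvStepA n) acc = acc ++ mid.flatMap pvGInt := by
  induction mid with
  | nil => intro s acc _; simp [PySem.List.enumerate]
  | cons c t ih =>
    intro s acc h
    rw [PySem.List.enumerate_cons]
    have h0 := h 0 (by simp)
    simp only [List.foldl_cons]
    rw [pvStep_mid n acc s c (by simpa using h0.1) (by simpa using h0.2)]
    rw [ih (s + 1) _ (fun k hk => by
      have := h (k + 1) (by simpa using Nat.succ_lt_succ hk)
      constructor <;> push_cast at this ⊢ <;> omega)]
    simp

lemma pvA_eq (text : String) :
    format_and_remove_special_characters text =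
      String.ofList ((PySem.List.enumerate text.toList 0).foldl
        (pvStepA ((text.toList.length : Nat) : Int)) []) := rfl

lemma pvB_eq (text : String) (h : '\x00' ∉ text.toList) :
    format_and_remove_special_characters_alt text =
      String.ofList (pvTrim text.toList (text.toList.flatMap pvGInt)) := by
  unfold format_and_remove_special_characters_alt pvTrim
  dsimp only
  rw [pvBody_eq _ h]

lemma pvTrim_concat (c0 cL : Char) (mid : List Char) :
    pvTrim (c0 :: (mid ++ [cL])) (pvGInt c0 ++ (mid.flatMap pvGInt ++ pvGInt cL)) =
      pvGEdge c0 ++ (mid.flatMap pvGInt ++ pvGEdge cL) := by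
  have hlast : (c0 :: (mid ++ [cL])).getLast? = some cL := by
    rw [show c0 :: (mid ++ [cL]) = (c0 :: mid) ++ [cL] by simp]
    exact List.getLast?_concat
  by_cases hS0 : c0 ∈ pvSpecial <;> by_cases hSL : cL ∈ pvSpecial <;>
    simp [pvTrim, hlast, pvGInt, pvGEdge, hS0, hSL, ← List.append_assoc]

lemma pvList_main (cs : List Char) :
    (PySem.List.enumerate cs 0).foldl (pvStepA ((cs.length : Nat) : Int)) [] =
      pvTrim cs (cs.flatMap pvGInt) := by
  cases cs with
  | nil => rfl
  | cons c0 rest =>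
    rcases rest.eq_nil_or_concat' with hrest | ⟨mid, cL, hrest⟩
    · subst hrest
      by_cases hS : c0 ∈ pvSpecial <;>
        by_cases hA : PySem.Chars.isalnum c0 = true <;>
        simp [pvTrim, pvStepA, pvGInt, PySem.List.enumerate, hS, hA]
    · subst hrest
      have hn : (((c0 :: (mid ++ [cL])).length : Nat) : Int) = (mid.length : Int) + 2 := by
        simp; omega
      rw [PySem.List.enumerate_cons, List.foldl_cons, pvStep_first]
      rw [PySem.List.enumerate_append, List.foldl_append]
      simp only [zero_add, List.nil_append]
      rw [pvFoldl_mid (((c0 :: (mid ++ [cL])).length : Nat) : Int) mid 1 _ (fun k hk => by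
        rw [hn]; constructor <;> omega)]
      rw [show PySem.List.enumerate [cL] (1 + (mid.length : Int))
            = [((1 + (mid.length : Int)), cL)] from rfl]
      simp only [List.foldl_cons, List.foldl_nil]
      rw [show (1 + (mid.length : Int)) = (((c0 :: (mid ++ [cL])).length : Nat) : Int) - 1 by
        rw [hn]; omega, pvStep_last]
      rw [show (c0 :: (mid ++ [cL])).flatMap pvGInt
            = pvGInt c0 ++ (mid.flatMap pvGInt ++ pvGInt cL) by simp]
      rw [pvTrim_concat]
      simp

-- ===== VERDICT (by name: the statement is the Claim_ definition above) =====
theorem format_and_remove_special_characters_spec : Claim_equal_format_and_remove_special_characters := by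
  intro text hdom
  have hnul : '\x00' ∉ text.toList := by
    intro hm
    have := List.all_eq_true.mp hdom _ hm
    simp [pvDomChar] at this
  unfold Spec_format_and_remove_special_characters
  rw [pvA_eq, pvB_eq _ hnul, pvList_main]
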